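-- pv_equiv track=rewrite | github.com/film6090/010123131 | tree_expression2/boolean_output.py | count_var
-- ===== SOURCE A (Python) =====
-- def count_var(t):
--     h0 = []
--     var = ('|','I')
--     for i in range(len(t)):
--         h1 = []
--         string = t[i]
--         for j in range(t[i].count('|')+t[i].count('I')):
--             pos0 = 99
--             for x in var:
--                 pos1 = string.find(x)
--                 if pos1 != (-1):
--                     if pos0 > pos1:
--                         pos0 = pos1
--             if not(string[pos0:pos0+2] in h1):
--                 h1.append(string[pos0:pos0+2])
--             string = string[pos0+1:]
--         h0.append(h1)
--     return h0
-- ===== SOURCE B (Python) =====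
-- def count_var(t):
--     out = []
--     for s in t:
--         toks = [s[i:i + 2] for i in range(len(s)) if s[i] == '|' or s[i] == 'I']
--         out.append(list(dict.fromkeys(toks)))
--     return out
-- ===== Notes on version B (the rewrite author's own statement) =====
-- stated objective: simpler
-- what changed: One direct index scan per string collecting s[i:i+2] at every '|'/'I' position, deduplicated with dict.fromkeys, instead of A's repeated find-minimum/slice/re-scan loop driven by a precomputed occurrence count and a sentinel start of 99.
-- intended difference: On strings where some '|'/'I' occurs at index >= 100 with no other '|'/'I' in the 100 positions before it, A's sentinel pos0=99 stops tracking the real position, so A returns junk two-char slices taken at offset 99 and drops later genuine tokens, while B returns exactly the deduplicated two-char slices at the variable positions, which is the function's evident intent. — e.g. on count_var(["aaaaaaaaaaaaaaaaaaaaaaaaaaaaaaaaaaaaaaaaaaaaaaaaaaaaaaaaaaaaaaaaaaaaaaaaaaaaaaaaaaaaaaaaaaaaaaaaaaaa|"]): A returns [["a|"]], B returns [["|"]]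
import Mathlib
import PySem

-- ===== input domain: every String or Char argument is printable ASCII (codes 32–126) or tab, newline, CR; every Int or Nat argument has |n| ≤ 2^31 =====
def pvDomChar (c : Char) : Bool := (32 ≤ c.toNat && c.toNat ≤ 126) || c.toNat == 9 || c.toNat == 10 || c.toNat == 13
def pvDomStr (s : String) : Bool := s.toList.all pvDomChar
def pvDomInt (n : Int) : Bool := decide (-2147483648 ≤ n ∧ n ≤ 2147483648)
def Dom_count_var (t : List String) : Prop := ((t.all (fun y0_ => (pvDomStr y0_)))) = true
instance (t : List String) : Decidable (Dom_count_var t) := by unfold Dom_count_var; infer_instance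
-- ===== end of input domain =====

-- B replaces A's repeated find/min/slice re-scanning (driven by a precomputed occurrence count and a
-- sentinel start value of 99) by one direct index scan per string plus an ordered dedup; on strings where
-- a '|'/'I' occurs at index >= 100 with no '|'/'I' in the 100 positions before it, A's sentinel returns
-- junk slices taken at offset 99 and drops later genuine tokens, while B returns the intended tokens (D_ below).




-- ===== PORT A =====
-- inner 'for x in var' loop of A
def pyA_pos0 (string : String) : Int :=
  (["|", "I"]).foldl
    (fun pos0 x =>
      let pos1 := PySem.Str.find string x
      if pos1 ≠ -1 then (if pos0 > pos1 then pos1 else pos0) else pos0)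
    99

-- one iteration of A's 'for j in range(...)' loop, state = (h1, string)
def pyA_body (st : List String × String) : List String × String :=
  let pos0 := pyA_pos0 st.2
  let tok := PySem.Str.slice st.2 (some pos0) (some (pos0 + 2))
  (if st.1.contains tok then st.1 else st.1 ++ [tok],
   PySem.Str.slice st.2 (some (pos0 + 1)) none)

-- A's whole inner loop for one string t[i]
def pyA_inner (s : String) : List String :=
  ((PySem.List.pyRange 0 ((PySem.Str.count s "|" : Int) + (PySem.Str.count s "I" : Int))).foldl
      (fun st _ => pyA_body st) ([], s)).1

def count_var (t : List String) : List (List String) :=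
  (PySem.List.pyRange 0 (t.length : Int)).foldl
    (fun h0 i => h0 ++ [pyA_inner (PySem.List.pyGetD t i "")]) []

-- ===== PORT B =====
-- B's per-string comprehension: s[i:i+2] for every i with s[i] == '|' or s[i] == 'I'
-- (s[i] is exact as getD: i ranges over List.range of the length, so it is always in bounds)
def pyB_tokens (s : String) : List String :=
  ((List.range s.toList.length).filter
      (fun i => s.toList.getD i ' ' == '|' || s.toList.getD i ' ' == 'I')).map
    (fun (i : Nat) => PySem.Str.slice s (some (i : Int)) (some ((i : Int) + 2)))

def count_var_alt (t : List String) : List (List String) :=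
  t.map (fun s => PySem.List.dedup (pyB_tokens s))

-- ===== PRECONDITION & SPEC =====
def pvVars : List Char := ['|', 'I']

-- On strings where some '|'/'I' occurs at an index i >= 100 with no '|'/'I' anywhere in the 100 positions
-- before it, A's sentinel start pos0 = 99 is below the real find position, so A returns junk two-character
-- slices taken at offset 99 and loses later genuine tokens; B returns exactly the deduplicated two-character
-- slices at the '|'/'I' positions, which is the function's evident intent.
def D_count_var (t : List String) : Prop :=
  ∃ s ∈ t, ∃ i < s.toList.length, s.toList.getD i ' ' ∈ pvVars ∧
    ∀ c ∈ (s.toList.drop (i - 100)).take 100, c ∉ pvVars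
instance (t : List String) : Decidable (D_count_var t) := by unfold D_count_var; infer_instance

def Spec_count_var (t : List String) (out : List (List String)) : Prop :=
  ¬ D_count_var t → out = count_var_alt t
instance (t : List String) (out : List (List String)) : Decidable (Spec_count_var t out) := by
  unfold Spec_count_var; infer_instance

def pvDiffWitness_count_var : List String := ["aaaaaaaaaaaaaaaaaaaaaaaaaaaaaaaaaaaaaaaaaaaaaaaaaaaaaaaaaaaaaaaaaaaaaaaaaaaaaaaaaaaaaaaaaaaaaaaaaaaa|"]
def pvDiffWitnessOut_count_var : (List (List String)) × (List (List String)) := ([["a|"]], [["|"]])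

-- ===== CLAIM (what is proved, stated in full; the proofs are below) =====
def Claim_unchanged_count_var : Prop :=
  ∀ (t : List String), Dom_count_var t → Spec_count_var t (count_var t)
def Claim_changed_count_var : Prop :=
  Dom_count_var (pvDiffWitness_count_var) ∧ D_count_var (pvDiffWitness_count_var) ∧
    count_var (pvDiffWitness_count_var) = pvDiffWitnessOut_count_var.1 ∧
    count_var_alt (pvDiffWitness_count_var) = pvDiffWitnessOut_count_var.2 ∧
    pvDiffWitnessOut_count_var.1 ≠ pvDiffWitnessOut_count_var.2
def Claim_exact_count_var : Prop :=
  ∀ (t : List String), Dom_count_var t → D_count_var t → count_var t ≠ count_var_alt t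

-- ===== LEMMAS AND PROOFS =====

def pvVarChar (c : Char) : Bool := c == '|' || c == 'I'

lemma pvVar_mem (c : Char) : c ∈ pvVars ↔ pvVarChar c = true := by
  simp [pvVars, pvVarChar]

-- proof-side token list: the two-character slice at every '|'/'I' position, in order
def tokensC : List Char → List (List Char)
  | [] => []
  | c :: cs => if pvVarChar c then ((c :: cs).take 2) :: tokensC cs else tokensC cs

def tokensS (cs : List Char) : List String := (tokensC cs).map String.ofList

def StrVarHead (x : String) : Bool :=
  match x.toList.head? with
  | some c => pvVarChar c
  | none => false

lemma find_go_single (x : Char) : ∀ (cs : List Char) (k : Nat),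
    PySem.Chars.find.go [x] cs k =
      (match cs.findIdx? (· == x) with | none => -1 | some p => ((k + p : Nat) : Int)) := by
  intro cs
  induction cs with
  | nil => intro k; simp [PySem.Chars.find.go]
  | cons c cs ih =>
    intro k
    rw [PySem.Chars.find.go]
    by_cases hc : c = x
    · simp [List.isPrefixOf, hc, List.findIdx?_cons]
    · have h1 : ([x].isPrefixOf (c :: cs)) = false := by
        simp [List.isPrefixOf]; exact fun h => absurd h.symm hc
      have h2 : (c == x) = false := by simp [hc]
      simp only [h1, Bool.false_eq_true, if_false, ih (k + 1), List.findIdx?_cons, h2]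
      cases hfi : cs.findIdx? (· == x) <;> simp <;> push_cast <;> ring

lemma find_single (cs : List Char) (x : Char) :
    PySem.Chars.find cs [x] =
      (match cs.findIdx? (· == x) with | none => -1 | some p => ((p : Nat) : Int)) := by
  have := find_go_single x cs 0
  simpa [PySem.Chars.find] using this

lemma count_go_single (x : Char) : ∀ (fuel : Nat) (cs : List Char) (acc : Nat),
    cs.length ≤ fuel → PySem.Chars.count.go [x] fuel cs acc = acc + cs.count x := by
  intro fuel
  induction fuel with
  | zero =>
    intro cs acc h
    have : cs = [] := List.length_eq_zero_iff.mp (Nat.le_zero.mp h)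
    subst this; simp [PySem.Chars.count.go]
  | succ n ih =>
    intro cs acc h
    cases cs with
    | nil => simp [PySem.Chars.count.go]
    | cons c cs =>
      rw [PySem.Chars.count.go]
      by_cases hc : c = x
      · have h1 : ([x].isPrefixOf (c :: cs)) = true := by simp [List.isPrefixOf, hc]
        simp only [h1, if_true]
        have hd : List.drop [x].length (c :: cs) = cs := by simp
        rw [hd, ih cs (acc + 1) (by simpa using h), List.count_cons]
        simp [hc]; omega
      · have h1 : ([x].isPrefixOf (c :: cs)) = false := by
          simp [List.isPrefixOf]; exact fun h => absurd h.symm hc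
        simp only [h1, Bool.false_eq_true, if_false]
        rw [ih cs acc (by simpa using h), List.count_cons]
        simp [hc]

lemma count_single (cs : List Char) (x : Char) : PySem.Chars.count cs [x] = cs.count x := by
  have he : ([x] : List Char).isEmpty = false := rfl
  simp [PySem.Chars.count, he, count_go_single x cs.length cs 0 le_rfl]

lemma countP_var_split (cs : List Char) :
    cs.countP pvVarChar = cs.count '|' + cs.count 'I' := by
  induction cs with
  | nil => simp
  | cons c cs ih =>
    rw [List.countP_cons, List.count_cons, List.count_cons, ih]
    by_cases h1 : c = '|'
    · simp [pvVarChar, h1]; omega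
    · by_cases h2 : c = 'I' <;> simp [pvVarChar, h1, h2] <;> omega

lemma findIdx?_var_split (cs : List Char) (p : Nat) (hp : cs.findIdx? pvVarChar = some p) :
    (cs.findIdx? (· == '|') = some p ∨ cs.findIdx? (· == 'I') = some p) ∧
      (∀ q, cs.findIdx? (· == '|') = some q → p ≤ q) ∧
      (∀ q, cs.findIdx? (· == 'I') = some q → p ≤ q) := by
  obtain ⟨hlt, hvar, hmin⟩ := List.findIdx?_eq_some_iff_getElem.mp hp
  refine ⟨?_, ?_, ?_⟩
  · have hvar' : cs[p] = '|' ∨ cs[p] = 'I' := by simpa [pvVarChar] using hvar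
    rcases hvar' with h | h
    · left
      exact List.findIdx?_eq_some_iff_getElem.mpr
        ⟨hlt, by simp [h], fun j hj hh => hmin j hj (by simp [pvVarChar, beq_iff_eq.mp hh])⟩
    · right
      exact List.findIdx?_eq_some_iff_getElem.mpr
        ⟨hlt, by simp [h], fun j hj hh => hmin j hj (by simp [pvVarChar, beq_iff_eq.mp hh])⟩
  · intro q hq
    by_contra hlt'
    push_neg at hlt'
    obtain ⟨hq1, hq2, _⟩ := List.findIdx?_eq_some_iff_getElem.mp hq
    exact hmin q hlt' (by simp [pvVarChar, beq_iff_eq.mp hq2])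
  · intro q hq
    by_contra hlt'
    push_neg at hlt'
    obtain ⟨hq1, hq2, _⟩ := List.findIdx?_eq_some_iff_getElem.mp hq
    exact hmin q hlt' (by simp [pvVarChar, beq_iff_eq.mp hq2])

lemma pos0_eq (s : String) (p : Nat) (hp : s.toList.findIdx? pvVarChar = some p) :
    pyA_pos0 s = min (p : Int) 99 := by
  obtain ⟨hdisj, hminA, hminB⟩ := findIdx?_var_split s.toList p hp
  simp only [pyA_pos0, List.foldl_cons, List.foldl_nil]
  rw [show PySem.Str.find s "|" = PySem.Chars.find s.toList ['|'] from rfl,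
      show PySem.Str.find s "I" = PySem.Chars.find s.toList ['I'] from rfl,
      find_single, find_single]
  rcases hfa : s.toList.findIdx? (· == '|') with _ | pa <;>
    rcases hfb : s.toList.findIdx? (· == 'I') with _ | pb <;>
      simp only [hfa, hfb, Option.some.injEq, reduceCtorEq, or_false, false_or, or_self]
        at hdisj ⊢
  · have h2 := hminB pb hfb
    subst hdisj
    split_ifs <;> omega
  · have h1 := hminA pa hfa
    subst hdisj
    split_ifs <;> omega
  · have h1 := hminA pa hfa
    have h2 := hminB pb hfb
    rcases hdisj with h | h <;> subst h <;> split_ifs <;> omega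

lemma tokensC_first (cs : List Char) :
    ∀ (p : Nat), cs.findIdx? pvVarChar = some p →
      tokensC cs = ((cs.drop p).take 2) :: tokensC (cs.drop (p + 1)) := by
  induction cs with
  | nil => intro p hp; simp at hp
  | cons c cs ih =>
    intro p hp
    rw [List.findIdx?_cons] at hp
    by_cases hc : pvVarChar c
    · simp [hc] at hp
      subst hp
      simp [tokensC, hc]
    · simp [hc] at hp
      obtain ⟨p', hp', rfl⟩ := hp
      simp [tokensC, hc, ih p' hp']

lemma length_tokensC (cs : List Char) : (tokensC cs).length = cs.countP pvVarChar := by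
  induction cs with
  | nil => simp [tokensC]
  | cons c cs ih =>
    rw [List.countP_cons]
    by_cases hc : pvVarChar c <;> simp [tokensC, hc, ih]

lemma tokensC_eq_range (cs : List Char) :
    ((List.range cs.length).filter (fun i => pvVarChar (cs.getD i ' '))).map
        (fun i => (cs.drop i).take 2) = tokensC cs := by
  induction cs with
  | nil => simp [tokensC]
  | cons c cs ih =>
    rw [List.length_cons, List.range_succ_eq_map, List.filter_cons]
    have h2 : ∀ i : Nat, ((c :: cs).getD (Nat.succ i) ' ') = cs.getD i ' ' := fun i => rfl
    rw [List.filter_map]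
    simp only [Function.comp_def, h2]
    by_cases hc : pvVarChar c
    · simp only [List.getD_cons_zero, hc, if_true, List.map_cons, List.map_map, tokensC]
      rw [← ih]
      simp [Function.comp_def]
    · simp only [List.getD_cons_zero, hc, Bool.false_eq_true, if_false, List.map_map, tokensC]
      rw [← ih]
      simp [Function.comp_def]

lemma pyB_tokens_eq (s : String) : pyB_tokens s = tokensS s.toList := by
  unfold pyB_tokens tokensS
  rw [← tokensC_eq_range]
  have hpred : (fun i => s.toList.getD i ' ' == '|' || s.toList.getD i ' ' == 'I') =
      (fun i => pvVarChar (s.toList.getD i ' ')) := rfl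
  rw [hpred, List.map_map]
  apply List.map_congr_left
  intro i hi
  simp only [Function.comp_apply]
  simp only [PySem.Str.slice, PySem.Chars.slice]
  congr 1
  rw [show ((i : Int) + 2) = ((i : Int) + ((2 : Nat) : Int)) from rfl]
  exact PySem.List.slice_natCast_add _ i 2

lemma foldl_ignore {α : Type} (g : α → α) : ∀ (l : List Int) (init : α),
    l.foldl (fun st _ => g st) init = g^[l.length] init := by
  intro l
  induction l with
  | nil => intro init; simp
  | cons a l ih =>
    intro init
    rw [List.foldl_cons, List.length_cons, Function.iterate_succ_apply, ih]

lemma len_pyRange_nat (n : Nat) : (PySem.List.pyRange 0 (n : Int)).length = n := by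
  rw [PySem.List.length_pyRange_of_pos 0 (n : Int) (by norm_num)]
  split_ifs with h
  · simp
  · omega

lemma prefix_iterate (m : Nat) : ∀ (st : List String × String),
    st.1 <+: (pyA_body^[m] st).1 := by
  induction m with
  | zero => intro st; simp
  | succ m ih =>
    intro st
    rw [Function.iterate_succ_apply]
    refine List.IsPrefix.trans ?_ (ih (pyA_body st))
    simp only [pyA_body]
    split_ifs with h
    · exact List.prefix_refl _
    · exact List.prefix_append _ _

lemma getD_drop (cs : List Char) (n i : Nat) (h : n + i < cs.length) :
    (cs.drop n).getD i ' ' = cs.getD (n + i) ' ' := by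
  have h2 : i < (cs.drop n).length := by simp [List.length_drop]; omega
  rw [List.getD_eq_getElem _ _ h2, List.getD_eq_getElem _ _ h, List.getElem_drop]

-- the bad-gap condition of D_count_var, in the quantifier form the proofs use
abbrev BadGapP (cs : List Char) : Prop :=
  ∃ i, i < cs.length ∧ 100 ≤ i ∧ pvVarChar (cs.getD i ' ') = true ∧
    ∀ k, i - 100 ≤ k → k < i → pvVarChar (cs.getD k ' ') = false

lemma window_iff (cs : List Char) (i : Nat) (hi : i < cs.length) (h100 : 100 ≤ i) :
    (∀ c ∈ (cs.drop (i - 100)).take 100, c ∉ pvVars) ↔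
      ∀ k, i - 100 ≤ k → k < i → pvVarChar (cs.getD k ' ') = false := by
  constructor
  · intro h k hk1 hk2
    have hk3 : k < cs.length := by omega
    have hj : k - (i - 100) < ((cs.drop (i - 100)).take 100).length := by
      simp [List.length_take, List.length_drop]; omega
    have hmem0 := List.getElem_mem hj
    rw [List.getElem_take, List.getElem_drop] at hmem0
    have hmem : cs.getD k ' ' ∈ (cs.drop (i - 100)).take 100 := by
      rw [List.getD_eq_getElem _ _ hk3]
      convert hmem0 using 2
      omega
    have := h _ hmem
    rw [pvVar_mem] at this
    exact Bool.not_eq_true _ ▸ (by simpa using this)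
  · intro h x hx
    obtain ⟨j, hj, rfl⟩ := List.mem_iff_getElem.mp hx
    have hj100 : j < 100 := by
      have := hj; simp [List.length_take, List.length_drop] at this; omega
    have hjlen : i - 100 + j < cs.length := by
      have := hj; simp [List.length_take, List.length_drop] at this; omega
    rw [List.getElem_take, List.getElem_drop, pvVar_mem]
    have := h (i - 100 + j) (by omega) (by omega)
    rw [List.getD_eq_getElem _ _ hjlen] at this
    simp [this]

lemma dcond_iff (cs : List Char) :
    (∃ i < cs.length, cs.getD i ' ' ∈ pvVars ∧
      ∀ c ∈ (cs.drop (i - 100)).take 100, c ∉ pvVars) ↔ BadGapP cs := by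
  constructor
  · rintro ⟨i, hi, hvar, hwin⟩
    have h100 : 100 ≤ i := by
      by_contra hlt
      push_neg at hlt
      have hi0 : i - 100 = 0 := by omega
      have hjt : i < (cs.take 100).length := by simp [List.length_take]; omega
      have hmem : cs.getD i ' ' ∈ (cs.drop (i - 100)).take 100 := by
        rw [hi0, List.drop_zero, List.getD_eq_getElem _ _ hi]
        have := List.getElem_mem hjt
        rwa [List.getElem_take] at this
      exact hwin _ hmem hvar
    rw [pvVar_mem] at hvar
    exact ⟨i, hi, h100, hvar, (window_iff cs i hi h100).mp hwin⟩
  · rintro ⟨i, hi, h100, hvar, hwin⟩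
    rw [← pvVar_mem] at hvar
    exact ⟨i, hi, hvar, (window_iff cs i hi h100).mpr hwin⟩

lemma not_bad_first_le (cs : List Char) (p : Nat) (h : ¬ BadGapP cs)
    (hp : cs.findIdx? pvVarChar = some p) : p ≤ 99 := by
  by_contra h99
  push_neg at h99
  obtain ⟨hlt, hvar, hmin⟩ := List.findIdx?_eq_some_iff_getElem.mp hp
  refine h ⟨p, hlt, by omega, ?_, fun k hk1 hk2 => ?_⟩
  · rw [List.getD_eq_getElem cs ' ' hlt]; exact hvar
  · have hkl : k < cs.length := lt_trans hk2 hlt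
    rw [List.getD_eq_getElem cs ' ' hkl]
    exact Bool.not_eq_true _ ▸ (by simpa using hmin k hk2)

lemma not_bad_drop (cs : List Char) (p : Nat) (h : ¬ BadGapP cs)
    (hp : cs.findIdx? pvVarChar = some p) : ¬ BadGapP (cs.drop (p + 1)) := by
  intro hbad
  obtain ⟨i', hlen', h100', hvar', hwin'⟩ := hbad
  obtain ⟨hplt, hpvar, hpmin⟩ := List.findIdx?_eq_some_iff_getElem.mp hp
  rw [List.length_drop] at hlen'
  have hlen : p + 1 + i' < cs.length := by omega
  refine h ⟨p + 1 + i', hlen, by omega, ?_, fun k hk1 hk2 => ?_⟩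
  · rw [← getD_drop cs (p + 1) i' hlen]; exact hvar'
  · have hk3 : p + 1 ≤ k := by omega
    have hw := hwin' (k - (p + 1)) (by omega) (by omega)
    rw [getD_drop cs (p + 1) (k - (p + 1)) (by omega)] at hw
    rw [show p + 1 + (k - (p + 1)) = k by omega] at hw
    exact hw

lemma bad_drop (cs : List Char) (p : Nat) (h : BadGapP cs)
    (hp : cs.findIdx? pvVarChar = some p) (h99 : p ≤ 99) :
    BadGapP (cs.drop (p + 1)) := by
  obtain ⟨i, hlt, h100, hvar, hwin⟩ := h
  obtain ⟨hplt, hpvar, hpmin⟩ := List.findIdx?_eq_some_iff_getElem.mp hp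
  have hpi : p < i - 100 := by
    by_contra hge
    push_neg at hge
    have hpi' : p < i := by omega
    have := hwin p (by omega) hpi'
    rw [List.getD_eq_getElem cs ' ' hplt] at this
    rw [this] at hpvar
    exact Bool.false_ne_true hpvar
  refine ⟨i - (p + 1), ?_, by omega, ?_, fun k hk1 hk2 => ?_⟩
  · rw [List.length_drop]; omega
  · rw [getD_drop cs (p + 1) (i - (p + 1)) (by omega),
      show p + 1 + (i - (p + 1)) = i by omega]
    exact hvar
  · rw [getD_drop cs (p + 1) k (by omega)]
    exact hwin (p + 1 + k) (by omega) (by omega)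

lemma step_eq (s : String) (h1 : List String) (p : Nat)
    (hp : s.toList.findIdx? pvVarChar = some p) (h99 : p ≤ 99) :
    pyA_body (h1, s) =
      (PySem.Set.add h1 (String.ofList ((s.toList.drop p).take 2)),
       String.ofList (s.toList.drop (p + 1))) := by
  have hpos : pyA_pos0 s = (p : Int) := by
    rw [pos0_eq s p hp]
    exact min_eq_left (by exact_mod_cast h99)
  have htok : PySem.Str.slice s (some (p : Int)) (some ((p : Int) + 2)) =
      String.ofList ((s.toList.drop p).take 2) := by
    simp only [PySem.Str.slice, PySem.Chars.slice]
    congr 1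
    rw [show ((p : Int) + 2) = ((p : Int) + ((2 : Nat) : Int)) from rfl]
    exact PySem.List.slice_natCast_add _ p 2
  have hrest : PySem.Str.slice s (some ((p : Int) + 1)) none =
      String.ofList (s.toList.drop (p + 1)) := by
    simp only [PySem.Str.slice, PySem.Chars.slice]
    congr 1
    rw [show ((p : Int) + 1) = (((p + 1 : Nat)) : Int) by push_cast; ring]
    exact PySem.List.slice_from_natCast _ (p + 1)
  simp only [pyA_body, hpos, htok, hrest]
  rfl

lemma step_eq_bad (s : String) (h1 : List String) (p : Nat)
    (hp : s.toList.findIdx? pvVarChar = some p) (h100 : 100 ≤ p) :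
    pyA_body (h1, s) =
      (PySem.Set.add h1 (String.ofList ((s.toList.drop 99).take 2)),
       String.ofList (s.toList.drop 100)) := by
  have hpos : pyA_pos0 s = (99 : Int) := by
    rw [pos0_eq s p hp]
    exact min_eq_right (by exact_mod_cast (by omega : 99 ≤ p))
  have htok : PySem.Str.slice s (some (99 : Int)) (some ((99 : Int) + 2)) =
      String.ofList ((s.toList.drop 99).take 2) := by
    simp only [PySem.Str.slice, PySem.Chars.slice]
    congr 1
    rw [show ((99 : Int)) = (((99 : Nat)) : Int) from rfl,
      show (((99 : Nat) : Int) + 2) = (((99 : Nat) : Int) + ((2 : Nat) : Int)) from rfl]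
    exact PySem.List.slice_natCast_add _ 99 2
  have hrest : PySem.Str.slice s (some ((99 : Int) + 1)) none =
      String.ofList (s.toList.drop 100) := by
    simp only [PySem.Str.slice, PySem.Chars.slice]
    congr 1
    rw [show ((99 : Int) + 1) = (((100 : Nat)) : Int) by norm_cast]
    exact PySem.List.slice_from_natCast _ 100
  simp only [pyA_body, hpos, htok, hrest]
  rfl

lemma exists_first_var (cs : List Char) (h : cs.countP pvVarChar ≠ 0) :
    ∃ p, cs.findIdx? pvVarChar = some p := by
  cases hfi : cs.findIdx? pvVarChar with
  | none =>
    exact absurd (List.countP_eq_zero.mpr (by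
      intro a ha
      simp [List.findIdx?_eq_none_iff.mp hfi a ha])) h
  | some p => exact ⟨p, rfl⟩

lemma countP_drop_first (cs : List Char) (p : Nat) (hp : cs.findIdx? pvVarChar = some p) :
    (cs.drop (p + 1)).countP pvVarChar + 1 = cs.countP pvVarChar := by
  have := congrArg List.length (tokensC_first cs p hp)
  rw [length_tokensC, List.length_cons, length_tokensC] at this
  omega

lemma inner_good : ∀ (k : Nat) (s : String) (h1 : List String),
    ¬ BadGapP s.toList → s.toList.countP pvVarChar = k →
    (pyA_body^[k] (h1, s)).1 = (tokensS s.toList).foldl PySem.Set.add h1 := by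
  intro k
  induction k with
  | zero =>
    intro s h1 hgood hcount
    have ht : tokensC s.toList = [] :=
      List.length_eq_zero_iff.mp (by rw [length_tokensC]; exact hcount)
    simp [tokensS, ht]
  | succ k ih =>
    intro s h1 hgood hcount
    obtain ⟨p, hp⟩ := exists_first_var s.toList (by omega)
    have h99 := not_bad_first_le s.toList p hgood hp
    rw [Function.iterate_succ_apply, step_eq s h1 p hp h99]
    have hteq : (String.ofList (s.toList.drop (p + 1))).toList = s.toList.drop (p + 1) :=
      String.toList_ofList
    rw [ih _ _ (by rw [hteq]; exact not_bad_drop s.toList p hgood hp)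
        (by rw [hteq]; have := countP_drop_first s.toList p hp; omega)]
    rw [hteq]
    simp [tokensS, tokensC_first s.toList p hp]

lemma pyA_inner_iter (s : String) :
    pyA_inner s = (pyA_body^[s.toList.countP pvVarChar] (([] : List String), s)).1 := by
  unfold pyA_inner
  rw [foldl_ignore]
  rw [show ((PySem.Str.count s "|" : Int) + (PySem.Str.count s "I" : Int)) =
      ((PySem.Str.count s "|" + PySem.Str.count s "I" : Nat) : Int) by push_cast; ring]
  rw [len_pyRange_nat]
  rw [show PySem.Str.count s "|" + PySem.Str.count s "I" = s.toList.countP pvVarChar by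
    rw [countP_var_split,
      show PySem.Str.count s "|" = PySem.Chars.count s.toList ['|'] from rfl,
      show PySem.Str.count s "I" = PySem.Chars.count s.toList ['I'] from rfl,
      count_single, count_single]]

lemma pyA_inner_eq (s : String) (h : ¬ BadGapP s.toList) :
    pyA_inner s = PySem.List.dedup (pyB_tokens s) := by
  rw [pyA_inner_iter, inner_good _ s [] h rfl, pyB_tokens_eq, PySem.List.dedup_eq_ofList]
  rfl

lemma count_var_eq_map (t : List String) : count_var t = t.map pyA_inner := by
  unfold count_var
  rw [PySem.List.foldl_append_singleton_eq_map (f := fun i => pyA_inner (PySem.List.pyGetD t i "")),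
    List.nil_append]
  rw [show (fun i => pyA_inner (PySem.List.pyGetD t i "")) =
      pyA_inner ∘ (fun j => PySem.List.pyGetD t j "") from rfl]
  rw [← List.map_map, show ((t.length : Int)) = PySem.List.len t from rfl,
    PySem.List.map_pyGetD_pyRange_zero]

lemma tokensC_head (cs : List Char) :
    ∀ y ∈ tokensC cs, ∃ c, y.head? = some c ∧ pvVarChar c = true := by
  induction cs with
  | nil => intro y hy; simp [tokensC] at hy
  | cons c cs ih =>
    intro y hy
    by_cases hc : pvVarChar c
    · rw [tokensC, if_pos hc] at hy
      rcases List.mem_cons.mp hy with h | h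
      · subst h
        exact ⟨c, by simp [List.take_succ_cons], hc⟩
      · exact ih y h
    · rw [tokensC, if_neg hc] at hy
      exact ih y hy

lemma alt_all_varHead (s : String) :
    ∀ y ∈ PySem.List.dedup (pyB_tokens s), StrVarHead y = true := by
  intro y hy
  rw [PySem.List.mem_dedup, pyB_tokens_eq, tokensS] at hy
  obtain ⟨z, hz, rfl⟩ := List.mem_map.mp hy
  obtain ⟨c, hc1, hc2⟩ := tokensC_head s.toList z hz
  simp [StrVarHead, String.toList_ofList, hc1, hc2]

set_option maxRecDepth 4096 in
lemma bad_run : ∀ (n : Nat) (s : String) (h1 : List String),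
    BadGapP s.toList → s.toList.countP pvVarChar = n →
    (∀ x ∈ h1, StrVarHead x = true) →
    ∃ y ∈ (pyA_body^[n] (h1, s)).1, StrVarHead y = false := by
  intro n
  induction n with
  | zero =>
    intro s h1 hbad hcount _
    obtain ⟨i, hlt, _, hvar, _⟩ := hbad
    rw [List.getD_eq_getElem _ ' ' hlt] at hvar
    exact absurd hvar (by simpa using List.countP_eq_zero.mp hcount _ (List.getElem_mem hlt))
  | succ n ih =>
    intro s h1 hbad hcount hinv
    obtain ⟨p, hp⟩ := exists_first_var s.toList (by omega)
    obtain ⟨hplt, hpvar, hpmin⟩ := List.findIdx?_eq_some_iff_getElem.mp hp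
    by_cases h99 : p ≤ 99
    · -- the first occurrence is still tracked correctly; the bad gap lies deeper
      rw [Function.iterate_succ_apply, step_eq s h1 p hp h99]
      have hteq : (String.ofList (s.toList.drop (p + 1))).toList = s.toList.drop (p + 1) :=
        String.toList_ofList
      refine ih _ _ (by rw [hteq]; exact bad_drop s.toList p hbad hp h99)
        (by rw [hteq]; have := countP_drop_first s.toList p hp; omega) ?_
      intro x hx
      rcases (PySem.Set.mem_add h1 _ x).mp hx with h | h
      · exact hinv x h
      · subst h
        have hdp : s.toList.drop p = s.toList[p] :: s.toList.drop (p + 1) :=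
          List.drop_eq_getElem_cons hplt
        simp only [StrVarHead, String.toList_ofList]
        rw [hdp]
        exact hpvar
    · -- the sentinel 99 is hit: a junk token whose head is not a variable char is appended
      push_neg at h99
      rw [Function.iterate_succ_apply, step_eq_bad s h1 p hp (by omega)]
      have h99lt : 99 < s.toList.length := by omega
      have hdp : s.toList.drop 99 = s.toList[99] :: s.toList.drop 100 :=
        List.drop_eq_getElem_cons h99lt
      have hhead : StrVarHead (String.ofList ((s.toList.drop 99).take 2)) = false := by
        have h99var : pvVarChar (s.toList[99]) = false := by
          simpa using hpmin 99 (by omega)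
        simp only [StrVarHead, String.toList_ofList]
        rw [hdp]
        exact h99var
      refine ⟨String.ofList ((s.toList.drop 99).take 2), ?_, hhead⟩
      exact (prefix_iterate n _).subset
        ((PySem.Set.mem_add h1 _ _).mpr (Or.inr rfl))

-- ===== VERDICT (by name: the statement is the Claim_ definition above) =====
theorem count_var_spec : Claim_unchanged_count_var := by
  intro t _ hnd
  rw [count_var_eq_map]
  unfold count_var_alt
  rw [List.map_eq_map_iff]
  intro s hs
  refine pyA_inner_eq s fun hb => ?_
  exact hnd ⟨s, hs, (dcond_iff s.toList).mpr hb⟩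

set_option maxRecDepth 8192 in
theorem count_var_changed : Claim_changed_count_var := by
  unfold Claim_changed_count_var
  refine ⟨by decide, ⟨"aaaaaaaaaaaaaaaaaaaaaaaaaaaaaaaaaaaaaaaaaaaaaaaaaaaaaaaaaaaaaaaaaaaaaaaaaaaaaaaaaaaaaaaaaaaaaaaaaaaa|", by decide, 100, by decide, by decide, ?_⟩,
    by decide, by decide, by decide⟩
  intro c hc
  have hl : ("aaaaaaaaaaaaaaaaaaaaaaaaaaaaaaaaaaaaaaaaaaaaaaaaaaaaaaaaaaaaaaaaaaaaaaaaaaaaaaaaaaaaaaaaaaaaaaaaaaaa|" : String).toList = List.replicate 100 'a' ++ ['|'] := by rfl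
  rw [hl, show (100 - 100 : Nat) = 0 from rfl, List.drop_zero,
    List.take_left' (by simp)] at hc
  rw [List.eq_of_mem_replicate hc]
  decide

theorem count_var_tight : Claim_exact_count_var := by
  intro t _ hd heq
  obtain ⟨s, hs, hcond⟩ := hd
  have hbad := (dcond_iff s.toList).mp hcond
  rw [count_var_eq_map] at heq
  unfold count_var_alt at heq
  have hse := List.map_eq_map_iff.mp heq s hs
  obtain ⟨y, hy, hyf⟩ :=
    bad_run (s.toList.countP pvVarChar) s [] hbad rfl (by intro x hx; simp at hx)
  rw [← pyA_inner_iter, hse] at hy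
  rw [alt_all_varHead s y hy] at hyf
  exact Bool.noConfusion hyf
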